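-- pv_equiv track=rewrite | github.com/Enoch-H-Kang/reasonably_reasoning | run_ps_br_games.py | choose_cooperative_travelers_tie_strategy
-- ===== SOURCE A (Python) =====
-- from typing import List, Optional, Tuple
--
-- def clamp_claim(value: int, low: int, high: int) -> int:
--     return max(low, min(high, value))
--
-- def travelers_deterministic_claim(
--     strategy: str,
--     self_history_claims: List[int],
--     opp_history_claims: List[int],
--     round_idx: int,
--     low: int,
--     high: int,
-- ) -> int:
--     if strategy == "claim_low":
--         return low
--     if strategy == "claim_high":
--         return high
--     if strategy == "claim_mid":
--         return (low + high) // 2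
--     if strategy == "match_last_opp":
--         if not opp_history_claims:
--             return high
--         return clamp_claim(opp_history_claims[-1], low, high)
--     if strategy == "undercut_last_opp":
--         if not opp_history_claims:
--             return high
--         return clamp_claim(opp_history_claims[-1] - 1, low, high)
--     if strategy == "step_down":
--         return clamp_claim(high - (round_idx - 1), low, high)
--     if strategy == "step_up":
--         return clamp_claim(low + (round_idx - 1), low, high)
--     if strategy == "random_claim":
--         return (low + high) // 2
--     raise ValueError(f"Unknown Traveler's Dilemma strategy: {strategy}")
--
-- def choose_cooperative_travelers_tie_strategy(
--     candidate_strategies: List[str],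
--     self_history_claims: List[int],
--     opp_history_claims: List[int],
--     round_idx: int,
--     low: int,
--     high: int,
-- ) -> str:
--     if not candidate_strategies:
--         raise ValueError("candidate_strategies must be non-empty")
--
--     scored: List[Tuple[int, str]] = []
--     for strategy_name in candidate_strategies:
--         claim = travelers_deterministic_claim(
--             strategy=strategy_name,
--             self_history_claims=self_history_claims,
--             opp_history_claims=opp_history_claims,
--             round_idx=round_idx,
--             low=low,
--             high=high,
--         )
--         scored.append((claim, strategy_name))
--
--     best_claim = max(claim for claim, _ in scored)
--     top = [name for claim, name in scored if claim == best_claim]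
--     return sorted(top)[0]
-- ===== SOURCE B (Python) =====
-- from typing import List
--
--
-- def clamp_claim(value: int, low: int, high: int) -> int:
--     return max(low, min(high, value))
--
--
-- def travelers_deterministic_claim(
--     strategy: str,
--     self_history_claims: List[int],
--     opp_history_claims: List[int],
--     round_idx: int,
--     low: int,
--     high: int,
-- ) -> int:
--     if strategy == "claim_low":
--         return low
--     if strategy == "claim_high":
--         return high
--     if strategy == "claim_mid":
--         return (low + high) // 2
--     if strategy == "match_last_opp":
--         if not opp_history_claims:
--             return high
--         return clamp_claim(opp_history_claims[-1], low, high)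
--     if strategy == "undercut_last_opp":
--         if not opp_history_claims:
--             return high
--         return clamp_claim(opp_history_claims[-1] - 1, low, high)
--     if strategy == "step_down":
--         return clamp_claim(high - (round_idx - 1), low, high)
--     if strategy == "step_up":
--         return clamp_claim(low + (round_idx - 1), low, high)
--     if strategy == "random_claim":
--         return (low + high) // 2
--     raise ValueError(f"Unknown Traveler's Dilemma strategy: {strategy}")
--
--
-- def choose_cooperative_travelers_tie_strategy(
--     candidate_strategies: List[str],
--     self_history_claims: List[int],
--     opp_history_claims: List[int],
--     round_idx: int,
--     low: int,
--     high: int,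
-- ) -> str:
--     if not candidate_strategies:
--         raise ValueError("candidate_strategies must be non-empty")
--
--     best_name = candidate_strategies[0]
--     best_claim = travelers_deterministic_claim(
--         best_name, self_history_claims, opp_history_claims, round_idx, low, high
--     )
--     for name in candidate_strategies[1:]:
--         claim = travelers_deterministic_claim(
--             name, self_history_claims, opp_history_claims, round_idx, low, high
--         )
--         if claim > best_claim:
--             best_claim = claim
--             best_name = name
--         elif claim == best_claim and name < best_name:
--             best_name = name
--     return best_name
-- ===== Notes on version B (the rewrite author's own statement) =====
-- stated objective: simpler
-- what changed: Replaces A's build-scored-list / max / filter / sort-and-take-head pipeline with a single running-best pass that keeps (best_claim, best_name) and resolves claim ties by taking the lexicographically smaller name on the fly, so no intermediate list, filter or sort is needed.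
import Mathlib
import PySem

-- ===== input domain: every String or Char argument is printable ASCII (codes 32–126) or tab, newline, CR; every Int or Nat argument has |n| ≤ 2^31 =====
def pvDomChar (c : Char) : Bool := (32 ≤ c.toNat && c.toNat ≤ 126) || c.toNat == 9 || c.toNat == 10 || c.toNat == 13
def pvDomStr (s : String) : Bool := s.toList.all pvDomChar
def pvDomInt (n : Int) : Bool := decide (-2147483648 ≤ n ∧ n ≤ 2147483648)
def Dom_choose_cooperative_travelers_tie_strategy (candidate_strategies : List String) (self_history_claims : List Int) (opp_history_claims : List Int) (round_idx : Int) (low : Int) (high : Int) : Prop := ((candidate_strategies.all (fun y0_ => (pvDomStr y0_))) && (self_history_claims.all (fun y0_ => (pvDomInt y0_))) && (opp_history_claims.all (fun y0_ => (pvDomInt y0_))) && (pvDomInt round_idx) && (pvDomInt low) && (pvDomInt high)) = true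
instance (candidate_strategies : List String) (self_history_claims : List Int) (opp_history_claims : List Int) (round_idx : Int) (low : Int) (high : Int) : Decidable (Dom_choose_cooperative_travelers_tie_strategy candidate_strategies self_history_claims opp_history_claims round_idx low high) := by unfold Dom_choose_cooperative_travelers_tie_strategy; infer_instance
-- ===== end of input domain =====

-- B replaces A's build-list / max / filter / sort pipeline by one running-best pass
-- (strict-greater update, lexicographic min on claim ties); same return value on Pre_.

-- ===== PORT A =====
-- clamp_claim
def pvClamp (value low high : Int) : Int := max low (min high value)

-- travelers_deterministic_claim; none = the final 'raise ValueError' (or an impossible IndexError)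
def pvTdClaim? (strategy : String) (self_history_claims : List Int) (opp_history_claims : List Int) (round_idx : Int) (low : Int) (high : Int) : Option Int :=
  if strategy = "claim_low" then some low
  else if strategy = "claim_high" then some high
  else if strategy = "claim_mid" then some (PySem.Int.floordiv (low + high) 2)
  else if strategy = "match_last_opp" then
    if opp_history_claims = [] then some high
    else (PySem.List.pyGet? opp_history_claims (-1)).map (fun x => pvClamp x low high)
  else if strategy = "undercut_last_opp" then
    if opp_history_claims = [] then some high
    else (PySem.List.pyGet? opp_history_claims (-1)).map (fun x => pvClamp (x - 1) low high)
  else if strategy = "step_down" then some (pvClamp (high - (round_idx - 1)) low high)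
  else if strategy = "step_up" then some (pvClamp (low + (round_idx - 1)) low high)
  else if strategy = "random_claim" then some (PySem.Int.floordiv (low + high) 2)
  else none

def choose_cooperative_travelers_tie_strategy (candidate_strategies : List String) (self_history_claims : List Int) (opp_history_claims : List Int) (round_idx : Int) (low : Int) (high : Int) : String :=
  if candidate_strategies = [] then ""   -- ValueError; outside Pre_
  else
    -- the 'scored' accumulation loop; none propagates the helper's ValueError (outside Pre_)
    match candidate_strategies.foldl
        (fun acc name => acc.bind (fun l =>
          (pvTdClaim? name self_history_claims opp_history_claims round_idx low high).map
            (fun c => l ++ [(c, name)])))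
        (some []) with
    | none => ""
    | some sc =>
      match PySem.List.max? (sc.map Prod.fst) (fun y => y) with
      | none => ""   -- unreachable: sc nonempty
      | some best =>
        let top := (sc.filter (fun p => decide (p.1 = best))).map Prod.snd
        match PySem.List.pyGet? (PySem.List.sorted top (fun y => y) false) 0 with
        | some s => s
        | none => ""   -- unreachable: top nonempty

-- ===== PORT B =====
def choose_cooperative_travelers_tie_strategy_alt (candidate_strategies : List String) (self_history_claims : List Int) (opp_history_claims : List Int) (round_idx : Int) (low : Int) (high : Int) : String :=
  match candidate_strategies with
  | [] => ""   -- ValueError; outside Pre_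
  | first :: rest =>
    match pvTdClaim? first self_history_claims opp_history_claims round_idx low high with
    | none => ""   -- ValueError; outside Pre_
    | some c0 =>
      match rest.foldl
          (fun acc name => acc.bind (fun b =>
            (pvTdClaim? name self_history_claims opp_history_claims round_idx low high).map
              (fun c =>
                if b.1 < c then (c, name)
                else if c = b.1 ∧ name < b.2 then (b.1, name)
                else b)))
          (some (c0, first)) with
      | some b => b.2
      | none => ""   -- ValueError; outside Pre_

-- ===== PRECONDITION & SPEC =====
def pvKnown (s : String) : Bool :=
  s == "claim_low" || s == "claim_high" || s == "claim_mid" || s == "match_last_opp" ||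
  s == "undercut_last_opp" || s == "step_down" || s == "step_up" || s == "random_claim"

-- Pre_ excludes exactly the inputs where A raises ValueError: an empty candidate list,
-- or a candidate that is not one of the eight known strategy names.
def Pre_choose_cooperative_travelers_tie_strategy (candidate_strategies : List String) (self_history_claims : List Int) (opp_history_claims : List Int) (round_idx : Int) (low : Int) (high : Int) : Prop :=
  candidate_strategies ≠ [] ∧ ∀ s ∈ candidate_strategies, pvKnown s = true
instance (candidate_strategies : List String) (self_history_claims : List Int) (opp_history_claims : List Int) (round_idx : Int) (low : Int) (high : Int) : Decidable (Pre_choose_cooperative_travelers_tie_strategy candidate_strategies self_history_claims opp_history_claims round_idx low high) := by unfold Pre_choose_cooperative_travelers_tie_strategy; infer_instance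

def pvWitness_choose_cooperative_travelers_tie_strategy : List String × List Int × List Int × Int × Int × Int :=
  (["claim_low", "claim_high", "claim_mid"], [3], [4], 1, 2, 10)

def Spec_choose_cooperative_travelers_tie_strategy (candidate_strategies : List String) (self_history_claims : List Int) (opp_history_claims : List Int) (round_idx : Int) (low : Int) (high : Int) (out : String) : Prop := out = choose_cooperative_travelers_tie_strategy_alt candidate_strategies self_history_claims opp_history_claims round_idx low high
instance (candidate_strategies : List String) (self_history_claims : List Int) (opp_history_claims : List Int) (round_idx : Int) (low : Int) (high : Int) (out : String) : Decidable (Spec_choose_cooperative_travelers_tie_strategy candidate_strategies self_history_claims opp_history_claims round_idx low high out) := by unfold Spec_choose_cooperative_travelers_tie_strategy; infer_instance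

-- ===== CLAIM (what is proved, stated in full; the proofs are below) =====
def Claim_equal_choose_cooperative_travelers_tie_strategy : Prop := ∀ (candidate_strategies : List String) (self_history_claims : List Int) (opp_history_claims : List Int) (round_idx : Int) (low : Int) (high : Int), Dom_choose_cooperative_travelers_tie_strategy candidate_strategies self_history_claims opp_history_claims round_idx low high → Pre_choose_cooperative_travelers_tie_strategy candidate_strategies self_history_claims opp_history_claims round_idx low high → Spec_choose_cooperative_travelers_tie_strategy candidate_strategies self_history_claims opp_history_claims round_idx low high (choose_cooperative_travelers_tie_strategy candidate_strategies self_history_claims opp_history_claims round_idx low high)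

-- ===== LEMMAS AND PROOFS =====

-- the claim value of a known strategy, total (proof-side helper)
def pvCV (strategy : String) (self_history_claims : List Int) (opp_history_claims : List Int) (round_idx : Int) (low : Int) (high : Int) : Int :=
  (pvTdClaim? strategy self_history_claims opp_history_claims round_idx low high).getD 0

def pvPair (strategy : String) (self_history_claims : List Int) (opp_history_claims : List Int) (round_idx : Int) (low : Int) (high : Int) : Int × String :=
  (pvCV strategy self_history_claims opp_history_claims round_idx low high, strategy)

-- B's loop body on total values
def pvStep (b p : Int × String) : Int × String :=
  if b.1 < p.1 then p else if p.1 = b.1 ∧ p.2 < b.2 then (b.1, p.2) else b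

-- minimal second component (on a nonempty list; "" default)
def pvMinSnd : List (Int × String) → String
  | [] => ""
  | p :: t => t.foldl (fun m q => min m q.2) p.2

theorem pvTdClaim?_known (s : String) (sh oh : List Int) (r lo hi : Int) (h : pvKnown s = true) :
    pvTdClaim? s sh oh r lo hi = some (pvCV s sh oh r lo hi) := by
  have hs : (pvTdClaim? s sh oh r lo hi).isSome := by
    unfold pvTdClaim?
    unfold pvKnown at h
    split_ifs with h1 h2 h3 h4 h5 h6 h7 h8 h9 h10 <;>
      simp_all [PySem.List.pyGet?_neg_one, List.getLast?_isSome]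
  unfold pvCV
  cases hE : pvTdClaim? s sh oh r lo hi with
  | none => rw [hE] at hs; simp at hs
  | some c => simp

theorem pvStep_fst (b p : Int × String) : (pvStep b p).1 = max b.1 p.1 := by
  unfold pvStep; split_ifs <;> simp <;> omega

theorem pv_scored_some (sh oh : List Int) (r lo hi : Int) :
    ∀ (cs : List String), (∀ s ∈ cs, pvKnown s = true) → ∀ init : List (Int × String),
      cs.foldl
        (fun acc name => acc.bind (fun l =>
          (pvTdClaim? name sh oh r lo hi).map (fun c => l ++ [(c, name)])))
        (some init)
      = some (init ++ cs.map (fun n => pvPair n sh oh r lo hi)) := by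
  intro cs
  induction cs with
  | nil => intro _ init; simp
  | cons c t ih =>
    intro h init
    simp only [List.foldl_cons, Option.bind_some, pvTdClaim?_known c sh oh r lo hi (h c (by simp)),
      Option.map_some]
    rw [ih (fun s hs => h s (by simp [hs]))]
    simp [pvPair]

theorem pv_bfold_some (sh oh : List Int) (r lo hi : Int) :
    ∀ (cs : List String), (∀ s ∈ cs, pvKnown s = true) → ∀ b : Int × String,
      cs.foldl
        (fun acc name => acc.bind (fun b =>
          (pvTdClaim? name sh oh r lo hi).map
            (fun c =>
              if b.1 < c then (c, name)
              else if c = b.1 ∧ name < b.2 then (b.1, name)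
              else b)))
        (some b)
      = some ((cs.map (fun n => pvPair n sh oh r lo hi)).foldl pvStep b) := by
  intro cs
  induction cs with
  | nil => intro _ b; simp
  | cons c t ih =>
    intro h b
    simp only [List.foldl_cons, Option.bind_some, pvTdClaim?_known c sh oh r lo hi (h c (by simp)),
      Option.map_some, List.map_cons]
    rw [ih (fun s hs => h s (by simp [hs]))]
    rfl

theorem pv_fold_spec :
    ∀ (sc : List (Int × String)) (a : Int × String),
      sc.foldl pvStep a =
        ((sc.map Prod.fst).foldl max a.1,
         pvMinSnd ((a :: sc).filter
           (fun p => decide (p.1 = (sc.map Prod.fst).foldl max a.1)))) := by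
  intro sc
  induction sc with
  | nil => intro a; simp [pvMinSnd]
  | cons p t ih =>
    intro a
    have hM : ((p :: t).map Prod.fst).foldl max a.1 = (t.map Prod.fst).foldl max (pvStep a p).1 := by
      simp [pvStep_fst]
    rw [List.foldl_cons, ih (pvStep a p), ← hM]
    set M := ((p :: t).map Prod.fst).foldl max a.1 with hMdef
    have hle : max a.1 p.1 ≤ M := by
      have := (PySem.List.le_foldl_max (t.map Prod.fst) (max a.1 p.1)).1
      rw [hMdef]; simpa [pvStep_fst] using this
    have haM : a.1 ≤ M := le_trans (le_max_left _ _) hle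
    have hpM : p.1 ≤ M := le_trans (le_max_right _ _) hle
    refine Prod.ext rfl ?_
    simp only
    -- compare the two filtered lists
    unfold pvStep
    split_ifs with h1 h2
    · -- a.1 < p.1 : a is not maximal, drop it
      have : ¬ a.1 = M := by omega
      simp [List.filter_cons, this]
    · -- tie, p.2 < a.2 : accumulator becomes (a.1, p.2)
      obtain ⟨hpe, hlt⟩ := h2
      by_cases haM' : a.1 = M
      · simp [haM', hpe, pvMinSnd, min_eq_right (le_of_lt hlt)]
      · have : ¬ p.1 = M := by rw [hpe]; exact haM'
        simp [haM', this]
    · -- keep the accumulator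
      by_cases hpM' : p.1 = M
      · have hpa : p.1 = a.1 := le_antisymm (by omega) (by omega)
        have haM' : a.1 = M := by omega
        have hge : a.2 ≤ p.2 := by
          by_contra hc
          exact h2 ⟨hpa, not_le.mp hc⟩
        simp [haM', hpM', pvMinSnd, min_eq_left hge]
      · simp [List.filter_cons, hpM']
  
theorem pv_head_sorted_min (h : String) (t : List String) :
    PySem.List.pyGet? (PySem.List.sorted (h :: t) (fun y => y) false) 0
      = some (t.foldl min h) := by
  cases hs : PySem.List.sorted (h :: t) (fun y => y) false with
  | nil => exact absurd ((PySem.List.sorted_eq_nil_iff _ _ _).mp hs) (by simp)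
  | cons m u =>
    rw [PySem.List.pyGet?_zero_cons]
    congr 1
    have hmem : m ∈ h :: t := (PySem.List.mem_sorted _ _ _ _).mp (by rw [hs]; simp)
    have hmin_mem : t.foldl min h ∈ h :: t := by
      rcases PySem.List.foldl_min_mem t h with he | he
      · rw [he]; simp
      · simp [he]
    have h1 : m ≤ t.foldl min h := PySem.List.key_head_sorted_le _ _ hs _ hmin_mem
    have h2 : t.foldl min h ≤ m := by
      rcases List.mem_cons.mp hmem with he | he
      · rw [he]; exact (PySem.List.foldl_min_le t h).1
      · exact (PySem.List.foldl_min_le t h).2 m he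
    exact le_antisymm h1 h2

-- ===== VERDICT (by name: the statement is the Claim_ definition above) =====
theorem choose_cooperative_travelers_tie_strategy_spec : Claim_equal_choose_cooperative_travelers_tie_strategy := by
  intro cs sh oh r lo hi _ hpre
  obtain ⟨hne, hknown⟩ := hpre
  unfold Spec_choose_cooperative_travelers_tie_strategy
  cases cs with
  | nil => exact absurd rfl hne
  | cons first rest =>
    unfold choose_cooperative_travelers_tie_strategy choose_cooperative_travelers_tie_strategy_alt
    rw [if_neg (by simp)]
    simp only []
    rw [pvTdClaim?_known first sh oh r lo hi (hknown first (by simp))]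
    simp only []
    rw [pv_scored_some sh oh r lo hi (first :: rest) hknown []]
    rw [pv_bfold_some sh oh r lo hi rest (fun s hs => hknown s (by simp [hs])) (pvCV first sh oh r lo hi, first)]
    simp only [List.nil_append, List.map_cons]
    set sc' := rest.map (fun n => pvPair n sh oh r lo hi) with hsc'
    have hBfold := pv_fold_spec sc' (pvPair first sh oh r lo hi)
    set M := (sc'.map Prod.fst).foldl max (pvPair first sh oh r lo hi).1 with hMdef
    have hmax : PySem.List.max? ((pvPair first sh oh r lo hi).1 :: sc'.map Prod.fst) (fun y => y)
        = some M := by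
      rw [PySem.List.max?_id_cons]
    rw [hmax]
    simp only []
    have hattain : ∃ q ∈ pvPair first sh oh r lo hi :: sc', q.1 = M := by
      rcases PySem.List.foldl_max_mem (sc'.map Prod.fst) (pvPair first sh oh r lo hi).1 with he | he
      · exact ⟨pvPair first sh oh r lo hi, by simp, he.symm⟩
      · rcases List.mem_map.mp he with ⟨q, hq, hq1⟩
        exact ⟨q, by simp [hq], hq1⟩
    cases hf : (pvPair first sh oh r lo hi :: sc').filter (fun p => decide (p.1 = M)) with
    | nil =>
      obtain ⟨q, hq, hq1⟩ := hattain
      have : q ∈ (pvPair first sh oh r lo hi :: sc').filter (fun p => decide (p.1 = M)) :=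
        List.mem_filter.mpr ⟨hq, by simp [hq1]⟩
      rw [hf] at this; simp at this
    | cons q qs =>
      rw [List.map_cons, pv_head_sorted_min q.2 (qs.map Prod.snd)]
      simp only []
      rw [show ((pvCV first sh oh r lo hi, first) : Int × String) = pvPair first sh oh r lo hi from rfl]
      rw [hBfold]
      simp only [hf]
      simp [pvMinSnd, List.foldl_map]
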